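-- pv_equiv track=rewrite | github.com/edt-yxz-zzd/python3_src | nn_ns/graph/rooted_tree.py | _is_vaild_parent_list
-- ===== SOURCE A (Python) =====
-- def _is_vaild_parent_list(root, parent):
--     n = len(parent)
--     if parent[root] != None: return False
--     flag = [0]*n
--     count = 0
--     for v, p in enumerate(parent):
--         if flag[v]: continue
--         count += 1
--         flag[v] = count
--         tmp = v
--         while p != v:
--             if p == None:
--                 if tmp != root:
--                     return False
--                 break
--             if flag[p]:
--                 if flag[p] == flag[v]:
--                     return False
--                 break
--             flag[p] = flag[v]
--             tmp = p
--             p = parent[p]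
--         else:
--             return False
--
--     return True
-- ===== SOURCE B (Python) =====
-- def _is_vaild_parent_list(root, parent):
--     n = len(parent)
--     if parent[root] is not None:
--         return False
--     reach = [False] * n
--     reach[root] = True
--     for _ in range(n):
--         for v, p in enumerate(parent):
--             if p is not None and reach[p]:
--                 reach[v] = True
--     return all(reach)
-- ===== Notes on version B (the rewrite author's own statement) =====
-- stated objective: alternative
-- what changed: B replaces A's upward chain-walking with flag-colouring and cycle detection by a bottom-up reachability fixpoint: mark the root, propagate reachability from parent to child for n rounds over the parent table, and accept iff every node becomes reachable (the unique-root and acyclicity checks fall out of reachability).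
-- outside the precondition, e.g. on _is_vaild_parent_list(1, [-1, None]): A returns False, B returns True; on _is_vaild_parent_list(-2, [None, 0]): A returns False, B returns True
import Mathlib
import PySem

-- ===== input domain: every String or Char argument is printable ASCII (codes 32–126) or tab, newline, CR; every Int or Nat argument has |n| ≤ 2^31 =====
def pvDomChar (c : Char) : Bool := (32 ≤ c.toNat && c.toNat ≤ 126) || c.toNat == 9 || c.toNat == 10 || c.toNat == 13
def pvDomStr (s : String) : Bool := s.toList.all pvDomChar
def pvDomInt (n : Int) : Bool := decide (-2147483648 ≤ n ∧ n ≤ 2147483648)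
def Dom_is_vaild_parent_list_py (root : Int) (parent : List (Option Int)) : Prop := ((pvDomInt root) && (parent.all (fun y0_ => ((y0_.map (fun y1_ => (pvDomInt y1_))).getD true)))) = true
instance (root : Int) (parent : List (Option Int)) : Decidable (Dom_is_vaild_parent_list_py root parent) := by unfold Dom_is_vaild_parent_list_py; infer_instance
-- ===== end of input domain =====

-- B replaces A's flagged upward chain-walking by a bottom-up reachability fixpoint over the
-- parent table (alternative decomposition; not claimed faster).


-- ===== PORT A =====
-- inner `while p != v` loop of A; fuel n+1 always suffices inside Pre_ (each pass flags a fresh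
-- zero slot); `none` = the loop ended in `return False`, `some flag` = break / continue outer loop.
-- parent[p] read as (pyGet? …).getD none: inside Pre_ the index is always in range.
def pvAWhile (parent : List (Option Int)) (root v : Int) :
    Nat → List Int → Int → Option Int → Option (List Int)
  | 0, _, _, _ => none
  | fuel + 1, flag, tmp, p =>
    if p ≠ some v then
      match p with
      | none => if tmp ≠ root then none else some flag
      | some q =>
        if PySem.List.pyGetD flag q 0 ≠ 0 then
          if PySem.List.pyGetD flag q 0 = PySem.List.pyGetD flag v 0 then none else some flag
        else
          pvAWhile parent root v fuel (PySem.List.pySetD flag q (PySem.List.pyGetD flag v 0)) q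
            ((PySem.List.pyGet? parent q).getD none)
    else none  -- while exited normally (p == v): `else: return False`

-- the `for v, p in enumerate(parent)` loop of A
def pvAOuter (parent : List (Option Int)) (root : Int) :
    List (Int × Option Int) → Int → List Int → Bool
  | [], _, _ => true
  | (v, p) :: rest, count, flag =>
    if PySem.List.pyGetD flag v 0 ≠ 0 then pvAOuter parent root rest count flag
    else
      match pvAWhile parent root v (parent.length + 1) (PySem.List.pySetD flag v (count + 1)) v p with
      | none => false
      | some flag' => pvAOuter parent root rest (count + 1) flag'

def is_vaild_parent_list_py (root : Int) (parent : List (Option Int)) : Bool :=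
  match PySem.List.pyGet? parent root with
  | none => false  -- IndexError in Python: outside Pre_
  | some pr =>
    if pr ≠ none then false
    else pvAOuter parent root (PySem.List.enumerate parent 0) 0 (List.replicate parent.length 0)

-- ===== PORT B =====
-- one pass `for v, p in enumerate(parent): if p is not None and reach[p]: reach[v] = True`
def pvBRow (reach : List Bool) : List (Int × Option Int) → List Bool
  | [] => reach
  | (v, p) :: rest =>
    match p with
    | none => pvBRow reach rest
    | some q =>
      if PySem.List.pyGetD reach q false then pvBRow (PySem.List.pySetD reach v true) rest
      else pvBRow reach rest

-- `for _ in range(n)`: n identical passes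
def pvBRounds (parent : List (Option Int)) : Nat → List Bool → List Bool
  | 0, reach => reach
  | k + 1, reach => pvBRounds parent k (pvBRow reach (PySem.List.enumerate parent 0))

def is_vaild_parent_list_py_alt (root : Int) (parent : List (Option Int)) : Bool :=
  match PySem.List.pyGet? parent root with
  | none => false  -- IndexError in Python: outside Pre_
  | some pr =>
    if pr ≠ none then false
    else
      (pvBRounds parent parent.length
        (PySem.List.pySetD (List.replicate parent.length false) root true)).all (fun b => b)

-- ===== PRECONDITION & SPEC =====
-- Pre_ requires root in index range (else A raises IndexError) and, when parent[root] is None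
-- (past A's immediate False), a non-negative root and parent entries that are None or in [0, n):
-- it excludes inputs with a negative root or negative parent entries, a corner where Python's
-- negative-index wraparound makes node identity ambiguous (index -1 aliases n-1 for indexing but
-- compares unequal to it), so neither A's raw-comparison answer nor B's uniform-wrap answer is
-- specified; out-of-range entries (where A raises or returns depending on traversal order) are
-- excluded with them.
def Pre_is_vaild_parent_list_py (root : Int) (parent : List (Option Int)) : Prop :=
  -(parent.length : Int) ≤ root ∧ root < parent.length ∧
  (PySem.List.pyGet? parent root = some none →
    0 ≤ root ∧ ∀ p ∈ parent, ∀ q : Int, p = some q → 0 ≤ q ∧ q < parent.length)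

instance (root : Int) (parent : List (Option Int)) : Decidable (Pre_is_vaild_parent_list_py root parent) := by
  unfold Pre_is_vaild_parent_list_py; infer_instance

def pvWitness_is_vaild_parent_list_py : Int × List (Option Int) := (0, [none, some 0, some 0])

def Spec_is_vaild_parent_list_py (root : Int) (parent : List (Option Int)) (out : Bool) : Prop := out = is_vaild_parent_list_py_alt root parent
instance (root : Int) (parent : List (Option Int)) (out : Bool) : Decidable (Spec_is_vaild_parent_list_py root parent out) := by unfold Spec_is_vaild_parent_list_py; infer_instance

-- ===== CLAIM (what is proved, stated in full; the proofs are below) =====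
def Claim_equal_is_vaild_parent_list_py : Prop := ∀ (root : Int) (parent : List (Option Int)), Dom_is_vaild_parent_list_py root parent → Pre_is_vaild_parent_list_py root parent → Spec_is_vaild_parent_list_py root parent (is_vaild_parent_list_py root parent)

-- ===== LEMMAS AND PROOFS =====

def pvStep (parent : List (Option Int)) (v : Nat) : Option Nat :=
  match parent[v]? with
  | some (some p) => some p.toNat
  | _ => none

def pvIter (parent : List (Option Int)) : Nat → Nat → Option Nat
  | 0, v => some v
  | k + 1, v =>
    match pvStep parent v with
    | some w => pvIter parent k w
    | none => none

def pvReaches (parent : List (Option Int)) (r v : Nat) : Prop :=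
  ∃ k, pvIter parent k v = some r

def pvMain (root : Int) (parent : List (Option Int)) : Prop :=
  0 ≤ root ∧ root < parent.length ∧ parent[root.toNat]? = some none ∧
  ∀ p ∈ parent, ∀ q : Int, p = some q → 0 ≤ q ∧ q < parent.length

-- generic getD-of-set helper
theorem pvGetD_set {α : Type} (xs : List α) (i w : Nat) (a d : α) :
    (xs.set i a).getD w d = if w = i ∧ i < xs.length then a else xs.getD w d := by
  simp only [List.getD, List.getElem?_set]
  by_cases h1 : i = w
  · subst h1
    by_cases h2 : i < xs.length <;> simp [h2]
  · have h1' : ¬ (w = i) := fun h => h1 h.symm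
    simp [h1, h1']

theorem pvStep_lt (root : Int) (parent : List (Option Int)) (m : pvMain root parent)
    (v w : Nat) (h : pvStep parent v = some w) : w < parent.length := by
  unfold pvStep at h
  rcases hp : parent[v]? with _ | p
  · rw [hp] at h; simp at h
  · rcases p with _ | q
    · rw [hp] at h; simp at h
    · rw [hp] at h
      simp only [Option.some.injEq] at h
      have hmem : (some q) ∈ parent := List.mem_of_getElem? hp
      have := m.2.2.2 _ hmem q rfl
      omega

theorem pvStep_root (root : Int) (parent : List (Option Int)) (m : pvMain root parent) :
    pvStep parent root.toNat = none := by
  unfold pvStep; rw [m.2.2.1]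

theorem pvIter_lt (root : Int) (parent : List (Option Int)) (m : pvMain root parent) :
    ∀ (i : Nat) (v u : Nat), v < parent.length → pvIter parent i v = some u → u < parent.length := by
  intro i
  induction i with
  | zero => intro v u hv h; simp [pvIter] at h; omega
  | succ k ih =>
    intro v u hv h
    unfold pvIter at h
    rcases hs : pvStep parent v with _ | w
    · rw [hs] at h; simp at h
    · rw [hs] at h
      exact ih w u (pvStep_lt root parent m v w hs) h

theorem pvIter_add (parent : List (Option Int)) :
    ∀ (a b v : Nat), pvIter parent (a + b) v = (pvIter parent a v).bind (fun w => pvIter parent b w) := by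
  intro a
  induction a with
  | zero => intro b v; simp [pvIter]
  | succ k ih =>
    intro b v
    have hh : k + 1 + b = (k + b) + 1 := by omega
    rw [hh]
    have hL : pvIter parent ((k + b) + 1) v = (match pvStep parent v with
      | some w => pvIter parent (k + b) w | none => none) := rfl
    have hv1 : pvIter parent (k + 1) v = (match pvStep parent v with
      | some w => pvIter parent k w | none => none) := rfl
    rcases hs : pvStep parent v with _ | w
    · rw [hL, hs, hv1, hs]; rfl
    · rw [hL, hs, hv1, hs]
      show pvIter parent (k + b) w = (pvIter parent k w).bind fun w => pvIter parent b w
      exact ih b w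

theorem pvIter_some_of_le (parent : List (Option Int)) (i k v r : Nat) (hik : i ≤ k)
    (h : pvIter parent k v = some r) : ∃ u, pvIter parent i v = some u := by
  have : k = i + (k - i) := by omega
  rw [this, pvIter_add] at h
  rcases hu : pvIter parent i v with _ | u
  · rw [hu] at h; simp at h
  · exact ⟨u, rfl⟩

-- a step-closed set avoiding r never reaches r
theorem pvCycle (parent : List (Option Int)) (S : List Nat)
    (hclosed : ∀ x ∈ S, ∃ y ∈ S, pvStep parent x = some y) (r : Nat) (hr : r ∉ S) :
    ∀ x ∈ S, ¬ pvReaches parent r x := by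
  intro x hx ⟨k, hk⟩
  induction k generalizing x with
  | zero => simp [pvIter] at hk; subst hk; exact hr hx
  | succ k ih =>
    unfold pvIter at hk
    rcases hclosed x hx with ⟨y, hy, hs⟩
    rw [hs] at hk
    exact ih y hy hk

-- every member of a step-chain reaches its last element
theorem pvChain_last (parent : List (Option Int)) :
    ∀ (C : List Nat), C.IsChain (fun a b => pvStep parent a = some b) →
      ∀ u, C.getLast? = some u → ∀ c ∈ C, ∃ k, pvIter parent k c = some u := by
  intro C
  induction C with
  | nil => intro _ u hu; simp at hu
  | cons a t ih =>
    intro hc u hu c hcmem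
    rcases t with _ | ⟨b, t'⟩
    · simp at hu hcmem
      subst hu; subst hcmem
      exact ⟨0, rfl⟩
    · have hstep : pvStep parent a = some b := (List.isChain_cons.mp hc).1 b rfl
      have hct : (b :: t').IsChain (fun a b => pvStep parent a = some b) := (List.isChain_cons.mp hc).2
      have hu' : (b :: t').getLast? = some u := by
        rw [List.getLast?_cons_cons] at hu; exact hu
      rcases hcmem with _ | hcmem
      · rcases ih hct u hu' b (List.mem_cons_self) with ⟨k, hk⟩
        exact ⟨k + 1, by unfold pvIter; rw [hstep]; exact hk⟩
      · exact ih hct u hu' c (by assumption)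

theorem pvReaches_trans (parent : List (Option Int)) (r u c : Nat) (k : Nat)
    (h1 : pvIter parent k c = some u) (h2 : pvReaches parent r u) : pvReaches parent r c := by
  rcases h2 with ⟨k2, hk2⟩
  exact ⟨k + k2, by rw [pvIter_add, h1]; exact hk2⟩

-- pigeonhole: a reachable node reaches within n steps
theorem pvReaches_le (root : Int) (parent : List (Option Int)) (m : pvMain root parent)
    (r v : Nat) (hv : v < parent.length) (h : pvReaches parent r v) :
    ∃ k ≤ parent.length, pvIter parent k v = some r := by
  classical
  have hex : ∃ k, pvIter parent k v = some r := h
  set k0 := Nat.find hex with hk0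
  have hk0spec : pvIter parent k0 v = some r := Nat.find_spec hex
  by_cases hle : k0 ≤ parent.length
  · exact ⟨k0, hle, hk0spec⟩
  · exfalso
    have hle' : parent.length < k0 := Nat.lt_of_not_le hle
    have hval : ∀ i : Fin (parent.length + 1), ∃ u, pvIter parent (i : Nat) v = some u ∧ u < parent.length := by
      intro i
      have : (i : Nat) ≤ k0 := by omega
      rcases pvIter_some_of_le parent i k0 v r this hk0spec with ⟨u, hu⟩
      exact ⟨u, hu, pvIter_lt root parent m i v u hv hu⟩
    let f : Fin (parent.length + 1) → Fin parent.length :=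
      fun i => ⟨(hval i).choose, (hval i).choose_spec.2⟩
    have hcard : Fintype.card (Fin parent.length) < Fintype.card (Fin (parent.length + 1)) := by
      simp
    rcases Fintype.exists_ne_map_eq_of_card_lt f hcard with ⟨i, j, hij, hfeq⟩
    -- wlog i < j
    rcases Nat.lt_or_ge (i : Nat) (j : Nat) with hlt | hge
    · have h1 : pvIter parent (i : Nat) v = pvIter parent (j : Nat) v := by
        have hi := (hval i).choose_spec.1
        have hj := (hval j).choose_spec.1
        rw [hi, hj]
        have : (hval i).choose = (hval j).choose := congrArg Fin.val hfeq
        rw [this]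
      -- then r is reached at k0 - (j - i) < k0
      have hkj : k0 = (j : Nat) + (k0 - (j : Nat)) := by omega
      rw [hkj, pvIter_add, ← h1] at hk0spec
      rw [← pvIter_add] at hk0spec
      have hmin := Nat.find_min hex (m := (i : Nat) + (k0 - (j : Nat))) (by omega)
      exact hmin hk0spec
    · have hlt : (j : Nat) < (i : Nat) := by
        rcases Nat.lt_or_ge (j : Nat) (i : Nat) with h' | h'
        · exact h'
        · exfalso; exact hij (Fin.ext (by omega))
      have h1 : pvIter parent (j : Nat) v = pvIter parent (i : Nat) v := by
        have hi := (hval i).choose_spec.1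
        have hj := (hval j).choose_spec.1
        rw [hi, hj]
        have : (hval j).choose = (hval i).choose := congrArg Fin.val hfeq.symm
        rw [this]
      have hkj : k0 = (i : Nat) + (k0 - (i : Nat)) := by omega
      rw [hkj, pvIter_add, ← h1] at hk0spec
      rw [← pvIter_add] at hk0spec
      have hmin := Nat.find_min hex (m := (j : Nat) + (k0 - (i : Nat))) (by omega)
      exact hmin hk0spec

-- a node whose parent entry is None reaches only itself
theorem pvDeadEnd (parent : List (Option Int)) (r v : Nat) (hv : parent[v]? = some none)
    (hne : v ≠ r) : ¬ pvReaches parent r v := by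
  rintro ⟨k, hk⟩
  cases k with
  | zero => simp [pvIter] at hk; exact hne hk
  | succ k =>
    unfold pvIter at hk
    have : pvStep parent v = none := by unfold pvStep; rw [hv]
    rw [this] at hk
    simp at hk

theorem pvNodupLength (n : Nat) (C : List Nat) (hnd : C.Nodup) (hlt : ∀ c ∈ C, c < n) :
    C.length ≤ n := by
  have h1 : C.toFinset.card = C.length := List.toFinset_card_of_nodup hnd
  have h2 : C.toFinset ⊆ Finset.range n := by
    intro x hx
    simp only [List.mem_toFinset] at hx
    exact Finset.mem_range.mpr (hlt x hx)
  have h3 := Finset.card_le_card h2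
  simp only [Finset.card_range] at h3
  omega



-- the elements of enumerate parent 0 are (w, parent[w])
theorem pvEnumElem (parent : List (Option Int)) :
    ∀ vp ∈ PySem.List.enumerate parent 0,
      ∃ w : Nat, w < parent.length ∧ vp.1 = (w : Int) ∧ parent[w]? = some vp.2 := by
  intro vp hvp
  rw [PySem.List.mem_enumerate_iff] at hvp
  rcases hvp with ⟨k, hk, hvp⟩
  exact ⟨k, hk, by simp [hvp], by simp [hvp]⟩

theorem pvBRow_length (reach : List Bool) (l : List (Int × Option Int))
    (hl : ∀ vp ∈ l, ∃ w : Nat, vp.1 = (w : Int)) :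
    (pvBRow reach l).length = reach.length := by
  induction l generalizing reach with
  | nil => rfl
  | cons vp rest ih =>
    rcases vp with ⟨v, p⟩
    rcases hl ⟨v, p⟩ List.mem_cons_self with ⟨w, hw⟩
    simp only at hw
    subst hw
    have hrest : ∀ vp ∈ rest, ∃ w : Nat, vp.1 = (w : Int) :=
      fun vp h => hl vp (List.mem_cons_of_mem _ h)
    rcases p with _ | q
    · exact ih reach hrest
    · simp only [pvBRow]
      split_ifs with h
      · rw [ih _ hrest, PySem.List.pySetD_natCast, List.length_set]
      · exact ih reach hrest

theorem pvBRow_mono (reach : List Bool) (l : List (Int × Option Int))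
    (hl : ∀ vp ∈ l, ∃ w : Nat, vp.1 = (w : Int)) (w : Nat)
    (h : reach.getD w false = true) : (pvBRow reach l).getD w false = true := by
  induction l generalizing reach with
  | nil => exact h
  | cons vp rest ih =>
    rcases vp with ⟨v, p⟩
    rcases hl ⟨v, p⟩ List.mem_cons_self with ⟨w0, hw0⟩
    simp only at hw0
    subst hw0
    have hrest : ∀ vp ∈ rest, ∃ w : Nat, vp.1 = (w : Int) :=
      fun vp h => hl vp (List.mem_cons_of_mem _ h)
    rcases p with _ | q
    · exact ih reach hrest h
    · simp only [pvBRow]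
      split_ifs with hq
      · refine ih _ hrest ?_
        rw [PySem.List.pySetD_natCast, pvGetD_set]
        split_ifs with h'
        · rfl
        · exact h
      · exact ih reach hrest h

-- soundness of one pass: only reachable nodes get marked
theorem pvBRow_sound (root : Int) (parent : List (Option Int)) (m : pvMain root parent)
    (l : List (Int × Option Int)) :
    ∀ reach : List Bool,
      (∀ vp ∈ l, ∃ w : Nat, w < parent.length ∧ vp.1 = (w : Int) ∧ parent[w]? = some vp.2) →
      reach.length = parent.length →
      (∀ w < parent.length, reach.getD w false = true → pvReaches parent root.toNat w) →
      ∀ w < parent.length, (pvBRow reach l).getD w false = true → pvReaches parent root.toNat w := by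
  induction l with
  | nil => intro reach _ _ hs; exact hs
  | cons vp rest ih =>
    intro reach hl hlen hs
    rcases vp with ⟨v, p⟩
    rcases hl ⟨v, p⟩ List.mem_cons_self with ⟨w0, hw0n, hw0v, hw0p⟩
    simp only at hw0v hw0p
    subst hw0v
    have hrest := fun vp h => hl vp (List.mem_cons_of_mem _ h)
    rcases p with _ | q
    · exact ih reach hrest hlen hs
    · simp only [pvBRow]
      have hq : 0 ≤ q ∧ q < (parent.length : Int) :=
        m.2.2.2 _ (List.mem_of_getElem? hw0p) q rfl
      split_ifs with hqr
      · have hqget : reach.getD q.toNat false = true := by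
          have hqlt : q.toNat < reach.length := by omega
          have h1 : PySem.List.pyGetD reach q false = reach[q.toNat] :=
            PySem.List.pyGetD_eq_getElem reach false hq.1 (by omega)
          have h2 : reach.getD q.toNat false = reach[q.toNat] := List.getD_eq_getElem _ _ hqlt
          rw [h2, ← h1, hqr]
        have hqn : q.toNat < parent.length := by omega
        have hreachq : pvReaches parent root.toNat q.toNat := hs q.toNat hqn hqget
        have hstep : pvStep parent w0 = some q.toNat := by
          unfold pvStep; rw [hw0p]
        have hreachw0 : pvReaches parent root.toNat w0 := by
          rcases hreachq with ⟨k, hk⟩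
          exact ⟨k + 1, by unfold pvIter; rw [hstep]; exact hk⟩
        refine ih _ hrest ?_ ?_
        · rw [PySem.List.pySetD_natCast, List.length_set]; exact hlen
        · intro w hw hget
          rw [PySem.List.pySetD_natCast, pvGetD_set] at hget
          by_cases hww : w = w0 ∧ w0 < reach.length
          · exact hww.1 ▸ hreachw0
          · rw [if_neg hww] at hget
            exact hs w hw hget
      · exact ih reach hrest hlen hs

-- completeness of one pass
theorem pvBRow_complete (parent : List (Option Int))
    (l : List (Int × Option Int)) :
    ∀ reach : List Bool,
      (∀ vp ∈ l, ∃ w : Nat, w < parent.length ∧ vp.1 = (w : Int) ∧ parent[w]? = some vp.2) →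
      reach.length = parent.length →
      ∀ (w0 : Nat) (q : Int), ((w0 : Int), some q) ∈ l → 0 ≤ q → q.toNat < parent.length →
      reach.getD q.toNat false = true →
      (pvBRow reach l).getD w0 false = true := by
  induction l with
  | nil => intro reach _ _ w0 q hmem; simp at hmem
  | cons vp rest ih =>
    intro reach hl hlen w0 q hmem hq0 hqn hqr
    rcases vp with ⟨v, p⟩
    rcases hl ⟨v, p⟩ List.mem_cons_self with ⟨w1, hw1n, hw1v, hw1p⟩
    simp only at hw1v hw1p
    subst hw1v
    have hrest := fun vp h => hl vp (List.mem_cons_of_mem _ h)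
    have hlqrest : ∀ vp ∈ rest, ∃ w : Nat, vp.1 = (w : Int) := by
      intro vp h
      rcases hrest vp h with ⟨w, _, hw, _⟩
      exact ⟨w, hw⟩
    have hget : PySem.List.pyGetD reach q false = true := by
      have hqlt : q.toNat < reach.length := by omega
      have h1 : PySem.List.pyGetD reach q false = reach[q.toNat] :=
        PySem.List.pyGetD_eq_getElem reach false hq0 (by omega)
      have h2 : reach.getD q.toNat false = reach[q.toNat] := List.getD_eq_getElem _ _ hqlt
      rw [h1, ← h2, hqr]
    rcases List.mem_cons.mp hmem with hhead | htail
    · have hv : (w0 : Int) = (w1 : Int) := by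
        have := congrArg Prod.fst hhead; simpa using this
      have hw10 : w0 = w1 := by exact_mod_cast hv
      have hp : p = some q := by
        have := congrArg Prod.snd hhead; simpa using this.symm
      subst hp
      simp only [pvBRow]
      rw [hget, if_pos rfl]
      apply pvBRow_mono _ _ hlqrest
      rw [PySem.List.pySetD_natCast, pvGetD_set]
      have hw1len : w1 < reach.length := by omega
      rw [hw10]
      simp [hw1len]
    · rcases p with _ | q'
      · exact ih reach hrest hlen w0 q htail hq0 hqn hqr
      · simp only [pvBRow]
        split_ifs with hq'
        · refine ih _ hrest ?_ w0 q htail hq0 hqn ?_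
          · rw [PySem.List.pySetD_natCast, List.length_set]; exact hlen
          · rw [PySem.List.pySetD_natCast, pvGetD_set]
            split_ifs with h'
            · rfl
            · exact hqr
        · exact ih reach hrest hlen w0 q htail hq0 hqn hqr

theorem pvEnumElemW (parent : List (Option Int)) :
    ∀ vp ∈ PySem.List.enumerate parent 0, ∃ w : Nat, vp.1 = (w : Int) := by
  intro vp h
  rcases pvEnumElem parent vp h with ⟨w, _, hw, _⟩
  exact ⟨w, hw⟩

theorem pvBRounds_sound (root : Int) (parent : List (Option Int)) (m : pvMain root parent) :
    ∀ (t : Nat) (reach : List Bool), reach.length = parent.length →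
      (∀ w < parent.length, reach.getD w false = true → pvReaches parent root.toNat w) →
      (pvBRounds parent t reach).length = parent.length ∧
      ∀ w < parent.length, (pvBRounds parent t reach).getD w false = true →
        pvReaches parent root.toNat w := by
  intro t
  induction t with
  | zero => intro reach hlen hs; exact ⟨hlen, hs⟩
  | succ t ih =>
    intro reach hlen hs
    show (pvBRounds parent t (pvBRow reach (PySem.List.enumerate parent 0))).length = _ ∧ _
    refine ih _ ?_ ?_
    · rw [pvBRow_length _ _ (pvEnumElemW parent)]; exact hlen
    · exact pvBRow_sound root parent m _ reach (pvEnumElem parent) hlen hs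

theorem pvBRounds_complete (root : Int) (parent : List (Option Int)) (m : pvMain root parent) :
    ∀ (t c : Nat) (reach : List Bool), reach.length = parent.length →
      (∀ w < parent.length, (∃ k ≤ c, pvIter parent k w = some root.toNat) →
        reach.getD w false = true) →
      ∀ w < parent.length, (∃ k ≤ c + t, pvIter parent k w = some root.toNat) →
        (pvBRounds parent t reach).getD w false = true := by
  intro t
  induction t with
  | zero => intro c reach hlen hcov w hw hk; exact hcov w hw hk
  | succ t ih =>
    intro c reach hlen hcov w hw hk
    show (pvBRounds parent t (pvBRow reach (PySem.List.enumerate parent 0))).getD w false = true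
    refine ih (c + 1) _ ?_ ?_ w hw ?_
    · rw [pvBRow_length _ _ (pvEnumElemW parent)]; exact hlen
    · -- one pass extends coverage from c to c + 1
      intro w' hw' ⟨k, hkc, hit⟩
      by_cases hkc' : k ≤ c
      · exact pvBRow_mono _ _ (pvEnumElemW parent) _ (hcov w' hw' ⟨k, hkc', hit⟩)
      · have hk1 : k = c + 1 := by omega
        subst hk1
        have hit' : (match pvStep parent w' with
            | some u => pvIter parent c u
            | none => none) = some root.toNat := hit
        rcases hs : pvStep parent w' with _ | u
        · rw [hs] at hit'; simp at hit'
        · rw [hs] at hit'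
          have hun : u < parent.length := pvStep_lt root parent m _ _ hs
          have hcovu : reach.getD u false = true := hcov u hun ⟨c, le_refl c, hit'⟩
          -- extract the integer parent entry at w'
          unfold pvStep at hs
          rcases hpe : parent[w']? with _ | pe
          · rw [hpe] at hs; simp at hs
          · rcases pe with _ | qI
            · rw [hpe] at hs; simp at hs
            · rw [hpe] at hs
              simp only [Option.some.injEq] at hs
              have hq : 0 ≤ qI ∧ qI < (parent.length : Int) :=
                m.2.2.2 _ (List.mem_of_getElem? hpe) qI rfl
              refine pvBRow_complete parent _ reach (pvEnumElem parent) hlen w' qI ?_ hq.1 ?_ ?_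
              · rw [PySem.List.mem_enumerate_iff]
                refine ⟨w', hw', ?_⟩
                have : parent[w'] = some qI := by
                  have h' := List.getElem?_eq_getElem (l := parent) (i := w') hw'
                  rw [h'] at hpe
                  exact Option.some.inj hpe
                simp [this]
              · rw [hs]; exact hun
              · rw [hs]; exact hcovu
    · rcases hk with ⟨k, hkle, hit⟩
      exact ⟨k, by omega, hit⟩

theorem pvB_main (root : Int) (parent : List (Option Int)) (h : pvMain root parent) :
    (is_vaild_parent_list_py_alt root parent = true ↔
      ∀ w < parent.length, pvReaches parent root.toNat w) := by
  rcases h with ⟨hr0, hrn, hroot, hentries⟩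
  have hm : pvMain root parent := ⟨hr0, hrn, hroot, hentries⟩
  have hrtn : root.toNat < parent.length := by omega
  have hget : PySem.List.pyGet? parent root = some none := by
    have h1 : PySem.List.pyGet? parent root = some parent[root.toNat] :=
      PySem.List.pyGet?_eq_some_getElem parent hr0 hrn
    have h2 : parent[root.toNat] = none := by
      have h' := List.getElem?_eq_getElem (l := parent) (i := root.toNat) hrtn
      rw [h'] at hroot
      exact Option.some.inj hroot
    rw [h1, h2]
  have hB : is_vaild_parent_list_py_alt root parent =
      (pvBRounds parent parent.length
        (PySem.List.pySetD (List.replicate parent.length false) root true)).all (fun b => b) := by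
    unfold is_vaild_parent_list_py_alt
    rw [hget]
    simp
  set reach0 : List Bool := PySem.List.pySetD (List.replicate parent.length false) root true with hreach0
  have hset : reach0 = (List.replicate parent.length false).set root.toNat true := by
    rw [hreach0]
    exact PySem.List.pySetD_of_nonneg _ _ hr0
  have hlen0 : reach0.length = parent.length := by
    rw [hset, List.length_set, List.length_replicate]
  have hget0 : ∀ w : Nat, reach0.getD w false = (if w = root.toNat then true else false) := by
    intro w
    rw [hset, pvGetD_set]
    by_cases hww : w = root.toNat
    · simp [hww, hrtn]
    · simp [hww]
  have hsound := pvBRounds_sound root parent hm parent.length reach0 hlen0 ?sound0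
  case sound0 =>
    intro w hw hgw
    rw [hget0] at hgw
    by_cases hww : w = root.toNat
    · exact hww ▸ ⟨0, rfl⟩
    · rw [if_neg hww] at hgw; exact absurd hgw (by simp)
  have hcomp := pvBRounds_complete root parent hm parent.length 0 reach0 hlen0 ?cov0
  case cov0 =>
    intro w hw hk
    rcases hk with ⟨k, hk0, hit⟩
    have hk00 : k = 0 := by omega
    subst hk00
    have hwr : w = root.toNat := by
      have : some w = some root.toNat := hit
      exact Option.some.inj this
    rw [hget0, if_pos hwr]
  constructor
  · intro hall w hw
    rw [hB] at hall
    have hmem : ∀ b ∈ pvBRounds parent parent.length reach0, b = true := by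
      simpa [List.all_eq_true] using hall
    apply hsound.2 w hw
    have hwlen : w < (pvBRounds parent parent.length reach0).length := by
      rw [hsound.1]; exact hw
    have hb := hmem _ (List.getElem_mem hwlen)
    rw [List.getD_eq_getElem _ _ hwlen]
    exact hb
  · intro hreach
    rw [hB]
    simp only [List.all_eq_true]
    intro b hb
    rcases List.mem_iff_getElem.mp hb with ⟨i, hi, hbi⟩
    have hi' : i < parent.length := by rw [← hsound.1]; exact hi
    rcases pvReaches_le root parent hm root.toNat i hi' (hreach i hi') with ⟨k, hkn, hit⟩
    have hcov := hcomp i hi' ⟨k, by omega, hit⟩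
    rw [List.getD_eq_getElem _ _ hi] at hcov
    rw [← hbi]
    exact hcov




theorem pvPyGetD_int {α : Type} (xs : List α) (d : α) (x : Int) (h0 : 0 ≤ x)
    (hx : x < (xs.length : Int)) : PySem.List.pyGetD xs x d = xs.getD x.toNat d := by
  rw [PySem.List.pyGetD_eq_getElem xs d h0 hx, List.getD_eq_getElem _ _ (by omega)]

theorem pvChainClosed {R : Nat → Nat → Prop} :
    ∀ (C : List Nat), C.IsChain R → ∀ t, C.getLast? = some t →
      ∀ x ∈ C, (∃ y ∈ C, R x y) ∨ x = t := by
  intro C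
  induction C with
  | nil => intro _ t ht; simp at ht
  | cons a l ih =>
    intro hc t ht x hx
    rcases l with _ | ⟨b, l'⟩
    · simp at ht hx
      right; rw [hx, ht]
    · have hR : R a b := (List.isChain_cons.mp hc).1 b rfl
      have hct := (List.isChain_cons.mp hc).2
      have ht' : (b :: l').getLast? = some t := by
        rw [List.getLast?_cons_cons] at ht; exact ht
      rcases List.mem_cons.mp hx with rfl | hx'
      · left; exact ⟨b, List.mem_cons_of_mem _ List.mem_cons_self, hR⟩
      · rcases ih hct t ht' x hx' with ⟨y, hy, hRy⟩ | rfl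
        · left; exact ⟨y, List.mem_cons_of_mem _ hy, hRy⟩
        · right; rfl

-- a chain whose last element steps back into the chain is a trap: no member reaches root
theorem pvChainTrap (root : Int) (parent : List (Option Int)) (m : pvMain root parent)
    (C : List Nat) (hc : C.IsChain (fun a b => pvStep parent a = some b))
    (t : Nat) (ht : C.getLast? = some t) (u : Nat) (hu : u ∈ C)
    (hstep : pvStep parent t = some u) :
    ∀ x ∈ C, ¬ pvReaches parent root.toNat x := by
  have hclosed : ∀ x ∈ C, ∃ y ∈ C, pvStep parent x = some y := by
    intro x hx
    rcases pvChainClosed C hc t ht x hx with h | rfl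
    · exact h
    · exact ⟨u, hu, hstep⟩
  have hr : root.toNat ∉ C := by
    intro hrC
    rcases hclosed root.toNat hrC with ⟨y, _, hy⟩
    rw [pvStep_root root parent m] at hy
    simp at hy
  exact pvCycle parent C hclosed root.toNat hr

theorem pvAWhile_spec (root : Int) (parent : List (Option Int)) (m : pvMain root parent)
    (v cnt : Int) (hv0 : 0 ≤ v) (hvn : v < (parent.length : Int)) (hcnt : 1 ≤ cnt) :
    ∀ (fuel : Nat) (flag : List Int) (tmp : Int) (p : Option Int) (C : List Nat),
      flag.length = parent.length →
      C ≠ [] →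
      C.head? = some v.toNat →
      C.getLast? = some tmp.toNat →
      0 ≤ tmp →
      C.IsChain (fun a b => pvStep parent a = some b) →
      (∀ c ∈ C, c < parent.length) →
      C.Nodup →
      parent[tmp.toNat]? = some p →
      (∀ w < parent.length, (flag.getD w 0 = cnt ↔ w ∈ C)) →
      (∀ w < parent.length, flag.getD w 0 ≠ 0 → flag.getD w 0 ≠ cnt → pvReaches parent root.toNat w) →
      (∀ w < parent.length, 0 ≤ flag.getD w 0 ∧ flag.getD w 0 ≤ cnt) →
      parent.length + 1 ≤ fuel + C.length →
      (match pvAWhile parent root v fuel flag tmp p with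
       | none => ∃ w, w < parent.length ∧ ¬ pvReaches parent root.toNat w
       | some flag' => flag'.length = parent.length ∧
           (∀ w < parent.length, flag'.getD w 0 ≠ 0 → pvReaches parent root.toNat w) ∧
           (∀ w < parent.length, flag.getD w 0 ≠ 0 → flag'.getD w 0 ≠ 0) ∧
           (∀ w < parent.length, 0 ≤ flag'.getD w 0 ∧ flag'.getD w 0 ≤ cnt)) := by
  intro fuel
  induction fuel with
  | zero =>
    intro flag tmp p C hlen hCne hChead hClast htmp0 hchain hCn hnodup hp hflagC hflagOld hLe hfuel
    exfalso
    have := pvNodupLength parent.length C hnodup hCn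
    omega
  | succ fuel ih =>
    intro flag tmp p C hlen hCne hChead hClast htmp0 hchain hCn hnodup hp hflagC hflagOld hLe hfuel
    have hvC : v.toNat ∈ C := List.mem_of_mem_head? hChead
    have hvCn : v.toNat < parent.length := hCn _ hvC
    have htmpC : tmp.toNat ∈ C := List.mem_of_getLast? hClast
    have htmpn : tmp.toNat < parent.length := hCn _ htmpC
    have hflagv : flag.getD v.toNat 0 = cnt := (hflagC _ hvCn).mpr hvC
    rcases p with _ | q
    · -- p is None
      simp only [pvAWhile]
      rw [if_pos (by simp)]
      by_cases htr : tmp = root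
      · rw [if_neg (by simp [htr])]
        have htmpr : tmp.toNat = root.toNat := by rw [htr]
        refine ⟨hlen, ?_, fun w _ h => h, hLe⟩
        intro w hw hnz
        by_cases hwcnt : flag.getD w 0 = cnt
        · have hwC : w ∈ C := (hflagC _ hw).mp hwcnt
          rcases pvChain_last parent C hchain tmp.toNat hClast w hwC with ⟨k, hk⟩
          exact ⟨k, by rw [hk, htmpr]⟩
        · exact hflagOld w hw hnz hwcnt
      · rw [if_pos (by simp [htr])]
        refine ⟨tmp.toNat, htmpn, pvDeadEnd parent root.toNat tmp.toNat hp ?_⟩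
        intro h
        have hr0 : 0 ≤ root := m.1
        omega
    · -- p = some q
      simp only [pvAWhile]
      have hq : 0 ≤ q ∧ q < (parent.length : Int) :=
        m.2.2.2 _ (List.mem_of_getElem? hp) q rfl
      have hqn : q.toNat < parent.length := by omega
      have hgq : PySem.List.pyGetD flag q 0 = flag.getD q.toNat 0 :=
        pvPyGetD_int flag 0 q hq.1 (by omega)
      have hgv : PySem.List.pyGetD flag (v : Int) 0 = flag.getD v.toNat 0 :=
        pvPyGetD_int flag 0 v hv0 (by omega)
      have hstep : pvStep parent tmp.toNat = some q.toNat := by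
        unfold pvStep; rw [hp]
      by_cases hqv : q = v
      · -- while exits normally: cycle through v
        rw [if_neg (by simp [hqv])]
        have hstep' : pvStep parent tmp.toNat = some v.toNat := by
          rw [hqv] at hstep; exact hstep
        exact ⟨v.toNat, hvCn,
          pvChainTrap root parent m C hchain tmp.toNat hClast v.toNat hvC hstep' v.toNat hvC⟩
      · rw [if_pos (by simp [hqv])]
        by_cases hfq0 : flag.getD q.toNat 0 = 0
        · -- unflagged: walk on
          rw [if_neg (by rw [hgq, hfq0]; simp)]
          have hqC : q.toNat ∉ C := by
            intro hin
            have := (hflagC _ hqn).mpr hin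
            omega
          have hflag1 : PySem.List.pySetD flag q (PySem.List.pyGetD flag (v : Int) 0) =
              flag.set q.toNat cnt := by
            rw [hgv, hflagv]
            exact PySem.List.pySetD_of_nonneg _ _ hq.1
          have hp' : parent[q.toNat]? = some ((PySem.List.pyGet? parent q).getD none) := by
            rw [PySem.List.pyGet?_eq_some_getElem parent hq.1 hq.2]
            simp [List.getElem?_eq_getElem hqn]
          have ihres := ih (flag.set q.toNat cnt) q ((PySem.List.pyGet? parent q).getD none)
            (C ++ [q.toNat])
            (by rw [List.length_set]; exact hlen)
            (by simp)
            (by rw [List.head?_append_of_ne_nil _ hCne]; exact hChead)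
            (by rw [List.getLast?_concat])
            hq.1
            (by
              rw [List.isChain_append]
              refine ⟨hchain, List.isChain_singleton _, ?_⟩
              intro x hx y hy
              simp only [List.head?_cons, Option.mem_def, Option.some.injEq] at hy
              rw [hClast] at hx
              simp only [Option.mem_def, Option.some.injEq] at hx
              rw [← hx, ← hy]
              exact hstep)
            (by
              intro c hc
              rcases List.mem_append.mp hc with h | h
              · exact hCn _ h
              · simp at h; omega)
            (by
              rw [List.nodup_append]
              refine ⟨hnodup, List.nodup_singleton _, ?_⟩
              intro a ha b hb
              rw [List.mem_singleton] at hb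
              subst hb
              intro h
              rw [h] at ha
              exact hqC ha)
            hp'
            (by
              intro w hw
              rw [pvGetD_set]
              by_cases hwq : w = q.toNat
              · subst hwq
                rw [if_pos ⟨rfl, by omega⟩]
                simp
              · rw [if_neg (by intro h; exact hwq h.1)]
                rw [List.mem_append]
                constructor
                · intro h; exact Or.inl ((hflagC _ hw).mp h)
                · intro h
                  rcases h with h | h
                  · exact (hflagC _ hw).mpr h
                  · simp at h; exact absurd h hwq)
            (by
              intro w hw hnz hne
              rw [pvGetD_set] at hnz hne
              by_cases hwq : w = q.toNat ∧ q.toNat < flag.length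
              · rw [if_pos hwq] at hne; exact absurd rfl hne
              · rw [if_neg hwq] at hnz hne
                exact hflagOld w hw hnz hne)
            (by
              intro w hw
              rw [pvGetD_set]
              by_cases hwq : w = q.toNat ∧ q.toNat < flag.length
              · rw [if_pos hwq]; omega
              · rw [if_neg hwq]; exact hLe w hw)
            (by rw [List.length_append, List.length_singleton]; omega)
          rw [hflag1]
          rcases hrec : pvAWhile parent root v fuel (flag.set q.toNat cnt) q
              ((PySem.List.pyGet? parent q).getD none) with _ | flag'
          · rw [hrec] at ihres
            exact ihres
          · rw [hrec] at ihres
            refine ⟨ihres.1, ihres.2.1, ?_, ihres.2.2.2⟩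
            intro w hw hnz
            apply ihres.2.2.1 w hw
            rw [pvGetD_set]
            by_cases hwq : w = q.toNat ∧ q.toNat < flag.length
            · rw [if_pos hwq]; omega
            · rw [if_neg hwq]; exact hnz
        · -- flagged already
          rw [if_pos (by rw [hgq]; exact hfq0)]
          by_cases hfqc : flag.getD q.toNat 0 = cnt
          · -- same colour: cycle
            rw [if_pos (by rw [hgq, hgv, hflagv, hfqc])]
            have hqC : q.toNat ∈ C := (hflagC _ hqn).mp hfqc
            exact ⟨v.toNat, hvCn,
              pvChainTrap root parent m C hchain tmp.toNat hClast q.toNat hqC hstep v.toNat hvC⟩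
          · -- older colour: break, chain hooks onto a proven node
            rw [if_neg (by rw [hgq, hgv, hflagv]; exact hfqc)]
            refine ⟨hlen, ?_, fun w _ h => h, hLe⟩
            intro w hw hnz
            by_cases hwcnt : flag.getD w 0 = cnt
            · have hwC : w ∈ C := (hflagC _ hw).mp hwcnt
              rcases pvChain_last parent C hchain tmp.toNat hClast w hwC with ⟨k, hk⟩
              have hreachq : pvReaches parent root.toNat q.toNat :=
                hflagOld q.toNat hqn hfq0 hfqc
              refine pvReaches_trans parent root.toNat q.toNat w (k + 1) ?_ hreachq
              rw [pvIter_add]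
              rw [hk]
              show pvIter parent 1 tmp.toNat = some q.toNat
              unfold pvIter
              rw [hstep]
              rfl
            · exact hflagOld w hw hnz hwcnt

theorem pvAOuter_spec (root : Int) (parent : List (Option Int)) (m : pvMain root parent) :
    ∀ (rest : List (Int × Option Int)) (cnt : Int) (flag : List Int),
      flag.length = parent.length →
      0 ≤ cnt →
      (∀ vp ∈ rest, ∃ w : Nat, w < parent.length ∧ vp.1 = (w : Int) ∧ parent[w]? = some vp.2) →
      (∀ w < parent.length, flag.getD w 0 ≠ 0 → pvReaches parent root.toNat w) →
      (∀ w < parent.length, 0 ≤ flag.getD w 0 ∧ flag.getD w 0 ≤ cnt) →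
      (∀ w < parent.length, flag.getD w 0 ≠ 0 ∨ ∃ p, ((w : Int), p) ∈ rest) →
      ((pvAOuter parent root rest cnt flag = true →
          ∀ w < parent.length, pvReaches parent root.toNat w) ∧
       (pvAOuter parent root rest cnt flag = false →
          ∃ w, w < parent.length ∧ ¬ pvReaches parent root.toNat w)) := by
  intro rest
  induction rest with
  | nil =>
    intro cnt flag hlen hcnt hrest hSound hLe hCover
    constructor
    · intro _ w hw
      rcases hCover w hw with h | ⟨p, hp⟩
      · exact hSound w hw h
      · simp at hp
    · intro h
      simp [pvAOuter] at h
  | cons vp rest ih =>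
    intro cnt flag hlen hcnt hrest hSound hLe hCover
    rcases vp with ⟨v, p⟩
    rcases hrest ⟨v, p⟩ List.mem_cons_self with ⟨w0, hw0n, hw0v, hw0p⟩
    simp only at hw0v hw0p
    subst hw0v
    have hrest' := fun vp h => hrest vp (List.mem_cons_of_mem _ h)
    simp only [pvAOuter, PySem.List.pyGetD_natCast]
    by_cases h0 : flag.getD w0 0 = 0
    · rw [if_neg (by simp only [ne_eq, not_not]; exact h0)]
      have hflag1 : PySem.List.pySetD flag ((w0 : Nat) : Int) (cnt + 1) =
          flag.set w0 (cnt + 1) := by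
        rw [PySem.List.pySetD_natCast]
      rw [hflag1]
      have hwhile := pvAWhile_spec root parent m ((w0 : Nat) : Int) (cnt + 1)
        (by omega) (by exact_mod_cast hw0n) (by omega)
        (parent.length + 1) (flag.set w0 (cnt + 1)) ((w0 : Nat) : Int) p [w0]
        (by rw [List.length_set]; exact hlen)
        (by simp)
        (by simp)
        (by simp)
        (by omega)
        (List.isChain_singleton _)
        (by intro c hc; rw [List.mem_singleton] at hc; subst hc; exact hw0n)
        (List.nodup_singleton _)
        (by simpa using hw0p)
        (by
          intro w hw
          rw [pvGetD_set, List.mem_singleton]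
          by_cases hwq : w = w0
          · subst hwq
            rw [if_pos ⟨rfl, by omega⟩]
            simp
          · rw [if_neg (by intro h; exact hwq h.1)]
            have := hLe w hw
            constructor
            · intro h; omega
            · intro h; exact absurd h hwq)
        (by
          intro w hw hnz hne
          rw [pvGetD_set] at hnz hne
          by_cases hwq : w = w0 ∧ w0 < flag.length
          · rw [if_pos hwq] at hne; exact absurd rfl hne
          · rw [if_neg hwq] at hnz
            exact hSound w hw hnz)
        (by
          intro w hw
          rw [pvGetD_set]
          by_cases hwq : w = w0 ∧ w0 < flag.length
          · rw [if_pos hwq]; omega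
          · rw [if_neg hwq]
            have := hLe w hw
            omega)
        (by omega)
      rcases hrec : pvAWhile parent root ((w0 : Nat) : Int) (parent.length + 1)
          (flag.set w0 (cnt + 1)) ((w0 : Nat) : Int) p with _ | flag'
      · rw [hrec] at hwhile
        constructor
        · intro h; exact absurd h (by simp)
        · intro _; exact hwhile
      · rw [hrec] at hwhile
        apply ih (cnt + 1) flag' hwhile.1 (by omega) hrest' hwhile.2.1 hwhile.2.2.2
        intro w hw
        rcases hCover w hw with hnz | ⟨p', hp'⟩
        · left
          apply hwhile.2.2.1 w hw
          rw [pvGetD_set]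
          by_cases hwq : w = w0 ∧ w0 < flag.length
          · rw [if_pos hwq]; omega
          · rw [if_neg hwq]; exact hnz
        · rcases List.mem_cons.mp hp' with hh | ht
          · left
            have hww0 : w = w0 := by
              have := congrArg Prod.fst hh
              simpa using this
            subst hww0
            apply hwhile.2.2.1 w hw
            rw [pvGetD_set]
            rw [if_pos ⟨rfl, by omega⟩]
            omega
          · right; exact ⟨p', ht⟩
    · rw [if_pos h0]
      apply ih cnt flag hlen hcnt hrest' hSound hLe
      intro w hw
      rcases hCover w hw with hnz | ⟨p', hp'⟩
      · left; exact hnz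
      · rcases List.mem_cons.mp hp' with hh | ht
        · left
          have hww0 : w = w0 := by
            have := congrArg Prod.fst hh
            simpa using this
          rw [hww0]
          exact h0
        · right; exact ⟨p', ht⟩

theorem pvA_main (root : Int) (parent : List (Option Int)) (h : pvMain root parent) :
    (is_vaild_parent_list_py root parent = true ↔
      ∀ w < parent.length, pvReaches parent root.toNat w) := by
  rcases h with ⟨hr0, hrn, hroot, hentries⟩
  have hm : pvMain root parent := ⟨hr0, hrn, hroot, hentries⟩
  have hrtn : root.toNat < parent.length := by omega
  have hget : PySem.List.pyGet? parent root = some none := by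
    have h1 : PySem.List.pyGet? parent root = some parent[root.toNat] :=
      PySem.List.pyGet?_eq_some_getElem parent hr0 hrn
    have h2 : parent[root.toNat] = none := by
      have h' := List.getElem?_eq_getElem (l := parent) (i := root.toNat) hrtn
      rw [h'] at hroot
      exact Option.some.inj hroot
    rw [h1, h2]
  have hA : is_vaild_parent_list_py root parent =
      pvAOuter parent root (PySem.List.enumerate parent 0) 0
        (List.replicate parent.length 0) := by
    unfold is_vaild_parent_list_py
    rw [hget]
    simp
  have houter := pvAOuter_spec root parent hm (PySem.List.enumerate parent 0) 0
    (List.replicate parent.length 0)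
    (by rw [List.length_replicate])
    (le_refl 0)
    (pvEnumElem parent)
    (by intro w hw hnz; exfalso; apply hnz; simp [List.getD])
    (by intro w hw; simp [List.getD])
    (by
      intro w hw
      right
      refine ⟨parent[w], ?_⟩
      rw [PySem.List.mem_enumerate_iff]
      exact ⟨w, hw, by simp⟩)
  rw [hA]
  constructor
  · exact houter.1
  · intro hall
    cases hout : pvAOuter parent root (PySem.List.enumerate parent 0) 0
        (List.replicate parent.length 0)
    · rcases houter.2 hout with ⟨w, hw, hnr⟩
      exact absurd (hall w hw) hnr
    · rfl


-- ===== VERDICT (by name: the statement is the Claim_ definition above) =====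
theorem is_vaild_parent_list_py_spec : Claim_equal_is_vaild_parent_list_py := by
  intro root parent hdom hpre
  unfold Spec_is_vaild_parent_list_py
  rcases hpre with ⟨h1, h2, h3⟩
  rcases hg : PySem.List.pyGet? parent root with _ | pr
  · exfalso
    rw [PySem.List.pyGet?_eq_none_iff] at hg
    apply hg
    show PySem.Raise.InRange parent.length root
    simp [PySem.Raise.InRange]
    omega
  · rcases pr with _ | x
    · have hroot0 := h3 hg
      have hr0 : 0 ≤ root := hroot0.1
      have hrtn : root.toNat < parent.length := by omega
      have hm : pvMain root parent := by
        refine ⟨hr0, h2, ?_, ?_⟩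
        · have h1' : PySem.List.pyGet? parent root = some parent[root.toNat] :=
            PySem.List.pyGet?_eq_some_getElem parent hr0 h2
          rw [h1'] at hg
          have hnone := Option.some.inj hg
          rw [List.getElem?_eq_getElem hrtn, hnone]
        · intro p hp q hq
          exact hroot0.2 p hp q hq
      have hA := pvA_main root parent hm
      have hB := pvB_main root parent hm
      by_cases hall : ∀ w < parent.length, pvReaches parent root.toNat w
      · rw [hA.mpr hall, hB.mpr hall]
      · have ha : is_vaild_parent_list_py root parent = false := by
          cases h : is_vaild_parent_list_py root parent
          · rfl
          · exact absurd (hA.mp h) hall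
        have hb : is_vaild_parent_list_py_alt root parent = false := by
          cases h : is_vaild_parent_list_py_alt root parent
          · rfl
          · exact absurd (hB.mp h) hall
        rw [ha, hb]
    · unfold is_vaild_parent_list_py is_vaild_parent_list_py_alt
      rw [hg]
      simp
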